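-- pv_equiv track=rewrite | github.com/StarWalkin/Open_Align_dev | preference_dissection/collect_model_preference/alignment-decomposition/shared/codes/utils.py | check_judgement_format
-- ===== SOURCE A (Python) =====
-- def check_judgement_format(judgement, protocol):
--     # should be like
--     prev_seg_id = 0
--     segs = judgement.split('\n')
--
--     checks = [False, False, False, False]
--
--     for seg in segs:
--         if any([seg.startswith(str(i) + '.') for i in range(1, 6)]):
--             if seg.startswith('1. The criteria that can significantly distinguish the two responses are:'):
--                 checks[1] = True
--             if seg.startswith("2. Other important factors that can significantly distinguish the two responses are:"):
--                 checks[2] = True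
--             if seg.startswith("2. The criteria that can significantly distinguish the two responses are:"):
--                 checks[2] = True
--             if seg.startswith("3. Other important factors that can significantly distinguish the two responses are:"):
--                 checks[3] = True
--             # line of index-starting
--             curr_seg_id = int(seg[0])
--             if curr_seg_id != prev_seg_id + 1:
--                 return False, f"Segment skip error: curr_seg_id={curr_seg_id}, prev_seg_id={prev_seg_id}"
--             prev_seg_id = curr_seg_id
--         elif seg.strip() == "":
--             continue
--         else:
--             if not seg.startswith('\t'):
--                 return False, f"Segment without tab error: {seg}"
--
--     # if check['2'] = True, then at least we should find a seg in segs that with current_seg_id=2 and not startswith('2. ') and non empty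
--     curr_seg_id = 0
--     for i in range(1, 4):
--         if checks[i]:
--             found = False
--             for seg in segs:
--                 if any([seg.startswith(str(i) + '.') for i in range(1, 6)]):
--                     curr_seg_id = int(seg[0])
--                 elif seg.strip() == "":
--                     continue
--                 else:
--                     if curr_seg_id == i:
--                         found = True
--                         break
--             if not found:
--                 return False, f"Segment not found error: {i} \n {judgement}"
--
--     return True, None
-- ===== SOURCE B (Python) =====
-- def check_judgement_format(judgement, protocol):
--     # One linear pass: collect required segment ids (from header prefixes) and the set of
--     # segment ids that own at least one content line, then check membership afterwards --
--     # no per-id rescan of the segments.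
--     HEADERS = {
--         '1. The criteria that can significantly distinguish the two responses are:': 1,
--         '2. Other important factors that can significantly distinguish the two responses are:': 2,
--         '2. The criteria that can significantly distinguish the two responses are:': 2,
--         '3. Other important factors that can significantly distinguish the two responses are:': 3,
--     }
--     required = set()
--     content_ids = set()
--     prev = 0
--     for seg in judgement.split('\n'):
--         if any(seg.startswith('%d.' % i) for i in range(1, 6)):
--             for prefix, idx in HEADERS.items():
--                 if seg.startswith(prefix):
--                     required.add(idx)
--             sid = int(seg[0])
--             if sid != prev + 1:
--                 return False, f"Segment skip error: curr_seg_id={sid}, prev_seg_id={prev}"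
--             prev = sid
--         elif seg.strip() == "":
--             continue
--         elif not seg.startswith('\t'):
--             return False, f"Segment without tab error: {seg}"
--         else:
--             content_ids.add(prev)
--     for i in range(1, 4):
--         if i in required and i not in content_ids:
--             return False, f"Segment not found error: {i} \n {judgement}"
--     return True, None
-- ===== Notes on version B (the rewrite author's own statement) =====
-- stated objective: alternative
-- what changed: B replaces A's second phase (up to three full rescans of the segment list, one per required id) by a single pass that also records, per content line, the id of its governing header in a set, then answers the three 'segment not found' questions by set membership.
import Mathlib
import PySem

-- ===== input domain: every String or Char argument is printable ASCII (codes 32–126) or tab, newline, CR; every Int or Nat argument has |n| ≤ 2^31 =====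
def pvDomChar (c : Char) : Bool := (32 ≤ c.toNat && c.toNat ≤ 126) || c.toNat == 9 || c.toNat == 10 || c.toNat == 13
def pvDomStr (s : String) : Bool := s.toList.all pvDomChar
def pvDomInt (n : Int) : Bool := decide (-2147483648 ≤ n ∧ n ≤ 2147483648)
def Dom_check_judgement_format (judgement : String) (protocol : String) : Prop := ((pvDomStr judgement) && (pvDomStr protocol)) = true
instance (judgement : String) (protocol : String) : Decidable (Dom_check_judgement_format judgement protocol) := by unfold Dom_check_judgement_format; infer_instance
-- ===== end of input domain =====

-- B replaces A's second phase (up to three rescans of the segments) by one pass that records each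
-- content line's governing header id in a set, answering the not-found checks by membership.

-- ===== PORT A =====
-- helpers shared by both ports: both Pythons contain these identical subexpressions
-- (the header test, int(seg[0]), and the three f-string error messages).

-- any([seg.startswith(str(i) + '.') for i in range(1, 6)])  (B: '%d.' % i, the same string)
def pvHdr (seg : List Char) : Bool :=
  ((PySem.List.pyRange 1 6 1).map
    (fun i => PySem.Chars.startswith seg (PySem.Int.toChars i ++ ['.']))).any id

-- int(seg[0]); both defaults are unreachable whenever pvHdr seg = true (seg starts with a digit)
def pvSegId (seg : List Char) : Int :=
  (PySem.Int.ofChars? [(PySem.List.pyGet? seg 0).getD ' ']).getD 0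

def pvSkipErr (curr prev : Int) : String :=
  String.ofList ("Segment skip error: curr_seg_id=".toList ++ PySem.Int.toChars curr
    ++ ", prev_seg_id=".toList ++ PySem.Int.toChars prev)

def pvTabErr (seg : List Char) : String :=
  String.ofList ("Segment without tab error: ".toList ++ seg)

def pvNotFoundErr (i : Int) (judgement : String) : String :=
  String.ofList ("Segment not found error: ".toList ++ PySem.Int.toChars i
    ++ " \n ".toList ++ judgement.toList)

def pvPfx1 : List Char := "1. The criteria that can significantly distinguish the two responses are:".toList
def pvPfx2a : List Char := "2. Other important factors that can significantly distinguish the two responses are:".toList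
def pvPfx2b : List Char := "2. The criteria that can significantly distinguish the two responses are:".toList
def pvPfx3 : List Char := "3. Other important factors that can significantly distinguish the two responses are:".toList

-- A, first loop: validates the format and fills checks[1..3]
def pvAPhase1 : List (List Char) → Int → List Bool → (List Bool) ⊕ (Bool × Option String)
  | [], _, checks => .inl checks
  | seg :: rest, prev, checks =>
    if pvHdr seg then
      let checks := if PySem.Chars.startswith seg pvPfx1 then PySem.List.pySetD checks 1 true else checks
      let checks := if PySem.Chars.startswith seg pvPfx2a then PySem.List.pySetD checks 2 true else checks
      let checks := if PySem.Chars.startswith seg pvPfx2b then PySem.List.pySetD checks 2 true else checks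
      let checks := if PySem.Chars.startswith seg pvPfx3 then PySem.List.pySetD checks 3 true else checks
      let curr := pvSegId seg
      if curr ≠ prev + 1 then .inr (false, some (pvSkipErr curr prev))
      else pvAPhase1 rest curr checks
    else if PySem.Chars.strip seg = [] then pvAPhase1 rest prev checks
    else if !(PySem.Chars.startswith seg ['\t']) then .inr (false, some (pvTabErr seg))
    else pvAPhase1 rest prev checks

-- A, inner scan of the second phase (for seg in segs: … break); returns (found, curr_seg_id)
def pvAScan : List (List Char) → Int → Int → Bool × Int
  | [], curr, _ => (false, curr)
  | seg :: rest, curr, i =>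
    if pvHdr seg then pvAScan rest (pvSegId seg) i
    else if PySem.Chars.strip seg = [] then pvAScan rest curr i
    else if curr == i then (true, curr)
    else pvAScan rest curr i

-- A, second phase: for i in range(1, 4)
def pvAPhase2 (judgement : String) (segs : List (List Char)) (checks : List Bool) :
    List Int → Int → Bool × Option String
  | [], _ => (true, none)
  | i :: is, curr =>
    if PySem.List.pyGetD checks i false then
      match pvAScan segs curr i with
      | (true, c) => pvAPhase2 judgement segs checks is c
      | (false, _) => (false, some (pvNotFoundErr i judgement))
    else pvAPhase2 judgement segs checks is curr

def check_judgement_format (judgement : String) (protocol : String) : Bool × Option String :=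
  let segs := PySem.Chars.splitOn judgement.toList "\n".toList
  match pvAPhase1 segs 0 [false, false, false, false] with
  | .inr r => r
  | .inl checks => pvAPhase2 judgement segs checks (PySem.List.pyRange 1 4 1) 0

-- ===== PORT B =====
-- the HEADERS dict of Source B, iterated in insertion order
def pvHeaders : List (List Char × Int) := [(pvPfx1, 1), (pvPfx2a, 2), (pvPfx2b, 2), (pvPfx3, 3)]

-- B, the single loop: state (prev, required, content_ids)
def pvBLoop (judgement : String) :
    List (List Char) → Int → PySem.Set Int → PySem.Set Int →
      (PySem.Set Int × PySem.Set Int) ⊕ (Bool × Option String)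
  | [], _, req, ids => .inl (req, ids)
  | seg :: rest, prev, req, ids =>
    if pvHdr seg then
      let req := pvHeaders.foldl
        (fun r p => if PySem.Chars.startswith seg p.1 then PySem.Set.add r p.2 else r) req
      let sid := pvSegId seg
      if sid ≠ prev + 1 then .inr (false, some (pvSkipErr sid prev))
      else pvBLoop judgement rest sid req ids
    else if PySem.Chars.strip seg = [] then pvBLoop judgement rest prev req ids
    else if !(PySem.Chars.startswith seg ['\t']) then .inr (false, some (pvTabErr seg))
    else pvBLoop judgement rest prev req (PySem.Set.add ids prev)

-- B, final membership check: for i in range(1, 4)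
def pvBFinal (judgement : String) (req ids : PySem.Set Int) : List Int → Bool × Option String
  | [] => (true, none)
  | i :: is =>
    if PySem.Set.contains req i && !(PySem.Set.contains ids i) then
      (false, some (pvNotFoundErr i judgement))
    else pvBFinal judgement req ids is

def check_judgement_format_alt (judgement : String) (protocol : String) : Bool × Option String :=
  let segs := PySem.Chars.splitOn judgement.toList "\n".toList
  match pvBLoop judgement segs 0 PySem.Set.empty PySem.Set.empty with
  | .inr r => r
  | .inl (req, ids) => pvBFinal judgement req ids (PySem.List.pyRange 1 4 1)

-- ===== PRECONDITION & SPEC =====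
def Spec_check_judgement_format (judgement : String) (protocol : String) (out : Bool × Option String) : Prop := out = check_judgement_format_alt judgement protocol
instance (judgement : String) (protocol : String) (out : Bool × Option String) : Decidable (Spec_check_judgement_format judgement protocol out) := by unfold Spec_check_judgement_format; infer_instance

-- ===== CLAIM (what is proved, stated in full; the proofs are below) =====
def Claim_equal_check_judgement_format : Prop := ∀ (judgement : String) (protocol : String), Dom_check_judgement_format judgement protocol → Spec_check_judgement_format judgement protocol (check_judgement_format judgement protocol)

-- ===== LEMMAS AND PROOFS =====

-- proof-only: the content-ids set B's loop has accumulated, as a pure function of the segments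
def pvIds : List (List Char) → Int → PySem.Set Int → PySem.Set Int
  | [], _, ids => ids
  | seg :: rest, prev, ids =>
    if pvHdr seg then pvIds rest (pvSegId seg) ids
    else if PySem.Chars.strip seg = [] then pvIds rest prev ids
    else if PySem.Chars.startswith seg ['\t'] then pvIds rest prev (PySem.Set.add ids prev)
    else pvIds rest prev ids

-- proof-only: every content line starts with a tab (what phase 1's success guarantees)
def pvTabAll (segs : List (List Char)) : Prop :=
  ∀ seg ∈ segs, pvHdr seg = false → PySem.Chars.strip seg ≠ [] →
    PySem.Chars.startswith seg ['\t'] = true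

-- the correspondence between A's checks list and B's required set
def pvR (checks : List Bool) (req : PySem.Set Int) : Prop :=
  checks.length = 4 ∧
  PySem.List.pyGetD checks 1 false = PySem.Set.contains req 1 ∧
  PySem.List.pyGetD checks 2 false = PySem.Set.contains req 2 ∧
  PySem.List.pyGetD checks 3 false = PySem.Set.contains req 3

lemma pv_contains_false {α : Type} [BEq α] [LawfulBEq α] (t : PySem.Set α) (z : α) (hz : z ∉ t) :
    PySem.Set.contains t z = false :=
  Bool.eq_false_iff.mpr (fun h => hz ((PySem.Set.contains_iff t z).1 h))

lemma pv_contains_add (s : PySem.Set Int) (x y : Int) :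
    PySem.Set.contains (PySem.Set.add s x) y = (PySem.Set.contains s y || (y == x)) := by
  by_cases hm : y ∈ s ∨ y = x
  · rw [(PySem.Set.contains_iff _ _).2 ((PySem.Set.mem_add s x y).2 hm)]
    rcases hm with h | h
    · rw [(PySem.Set.contains_iff s y).2 h]; rfl
    · simp [h]
  · have h1 : y ∉ s := fun h => hm (Or.inl h)
    have h2 : y ≠ x := fun h => hm (Or.inr h)
    rw [pv_contains_false _ _ (fun h => hm ((PySem.Set.mem_add s x y).1 h)),
        pv_contains_false s y h1]
    simp [h2]

lemma pv_tabAll_tail {seg : List Char} {rest : List (List Char)} (h : pvTabAll (seg :: rest)) :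
    pvTabAll rest :=
  fun s hs => h s (List.mem_cons_of_mem _ hs)

lemma pvR_set (checks : List Bool) (req : PySem.Set Int) (k : Int)
    (hk : k = 1 ∨ k = 2 ∨ k = 3) (h : pvR checks req) :
    pvR (PySem.List.pySetD checks k true) (PySem.Set.add req k) := by
  obtain ⟨hl, h1, h2, h3⟩ := h
  match checks, hl with
  | [a, b, c, d], _ =>
    rcases hk with rfl | rfl | rfl <;>
      exact ⟨by simp [PySem.List.pySetD_of_nonneg], by
        simp [PySem.List.pySetD_of_nonneg, PySem.List.pyGetD_ofNat', pv_contains_add] at h1 h2 h3 ⊢ <;>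
        simp [h1, h2, h3], by
        simp [PySem.List.pySetD_of_nonneg, PySem.List.pyGetD_ofNat', pv_contains_add] at h1 h2 h3 ⊢ <;>
        simp [h1, h2, h3], by
        simp [PySem.List.pySetD_of_nonneg, PySem.List.pyGetD_ofNat', pv_contains_add] at h1 h2 h3 ⊢ <;>
        simp [h1, h2, h3]⟩

lemma pvR_ite (checks : List Bool) (req : PySem.Set Int) (cond : Bool) (k : Int)
    (hk : k = 1 ∨ k = 2 ∨ k = 3) (h : pvR checks req) :
    pvR (if cond then PySem.List.pySetD checks k true else checks)
        (if cond then PySem.Set.add req k else req) := by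
  cases cond
  · simpa using h
  · simpa using pvR_set checks req k hk h

theorem pv_ids_mono (i : Int) :
    ∀ (segs : List (List Char)) (b : Int) (ids : PySem.Set Int),
      PySem.Set.contains ids i = true → PySem.Set.contains (pvIds segs b ids) i = true := by
  intro segs
  induction segs with
  | nil => intro b ids h; exact h
  | cons seg rest ih =>
    intro b ids h
    unfold pvIds
    split_ifs with h1 h2 h3
    · exact ih _ _ h
    · exact ih _ _ h
    · exact ih _ _ (by rw [pv_contains_add, h]; rfl)
    · exact ih _ _ h

theorem pv_scan_ids (i : Int) :
    ∀ (segs : List (List Char)) (c b : Int) (ids : PySem.Set Int),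
      pvTabAll segs → (c = b ∨ (c ≠ i ∧ b ≠ i)) →
      PySem.Set.contains (pvIds segs b ids) i =
        (PySem.Set.contains ids i || (pvAScan segs c i).1) := by
  intro segs
  induction segs with
  | nil => intro c b ids _ _; simp [pvIds, pvAScan]
  | cons seg rest ih =>
    intro c b ids htab hcb
    have htab' := pv_tabAll_tail htab
    unfold pvIds pvAScan
    by_cases h1 : pvHdr seg
    · simp only [h1, if_true]
      exact ih _ _ _ htab' (Or.inl rfl)
    · simp only [h1, Bool.false_eq_true, if_false]
      by_cases h2 : PySem.Chars.strip seg = []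
      · simp only [h2, if_true]
        exact ih _ _ _ htab' hcb
      · have htabseg : PySem.Chars.startswith seg ['\t'] = true :=
          htab seg List.mem_cons_self (by simpa using h1) h2
        simp only [h2, if_false, htabseg, if_true]
        by_cases h3 : c = i
        · have hb : b = i := by
            rcases hcb with h | h
            · omega
            · exact absurd h3 h.1
          have hci : (c == i) = true := by simp [h3]
          simp only [hci, if_true]
          rw [pv_ids_mono i rest b _ (by rw [pv_contains_add]; simp [hb])]
          simp
        · have hb : b ≠ i := by
            rcases hcb with h | h
            · omega
            · exact h.2
          have hci : (c == i) = false := by simp [h3]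
          simp only [hci, Bool.false_eq_true, if_false]
          rw [ih c b _ htab' (Or.inr ⟨h3, hb⟩), pv_contains_add]
          have : (i == b) = false := by simp [Ne.symm hb]
          simp [this]

theorem pv_scan_found_snd (i : Int) :
    ∀ (segs : List (List Char)) (c : Int),
      (pvAScan segs c i).1 = true → (pvAScan segs c i).2 = i := by
  intro segs
  induction segs with
  | nil => intro c h; simp [pvAScan] at h
  | cons seg rest ih =>
    intro c h
    unfold pvAScan at h ⊢
    by_cases h1 : pvHdr seg
    · simp only [h1, if_true] at h ⊢; exact ih _ h
    · simp only [h1, Bool.false_eq_true, if_false] at h ⊢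
      by_cases h2 : PySem.Chars.strip seg = []
      · simp only [h2, if_true] at h ⊢; exact ih _ h
      · simp only [h2, if_false] at h ⊢
        by_cases h3 : (c == i) = true
        · simp [h3, eq_of_beq h3]
        · simp only [eq_false_of_ne_true h3, Bool.false_eq_true, if_false] at h ⊢
          exact ih _ h

-- the shape of the result correspondence the single loop maintains against A's first phase
def pvCorr (segs : List (List Char)) (prev : Int) (ids : PySem.Set Int) :
    (List Bool) ⊕ (Bool × Option String) →
      (PySem.Set Int × PySem.Set Int) ⊕ (Bool × Option String) → Prop
  | .inr r, .inr r' => r' = r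
  | .inl ch, .inl p => pvR ch p.1 ∧ p.2 = pvIds segs prev ids ∧ pvTabAll segs
  | _, _ => False

theorem pv_loop_corr (judgement : String) :
    ∀ (segs : List (List Char)) (prev : Int) (checks : List Bool) (req ids : PySem.Set Int),
      pvR checks req →
      pvCorr segs prev ids (pvAPhase1 segs prev checks) (pvBLoop judgement segs prev req ids) := by
  intro segs
  induction segs with
  | nil =>
    intro prev checks req ids hR
    exact ⟨hR, rfl, fun s hs => absurd hs (List.not_mem_nil)⟩
  | cons seg rest ih =>
    intro prev checks req ids hR
    unfold pvAPhase1 pvBLoop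
    by_cases h1 : pvHdr seg
    · simp only [h1, if_true, pvHeaders, List.foldl_cons, List.foldl_nil]
      have hR' : pvR
          (if PySem.Chars.startswith seg pvPfx3 then
            PySem.List.pySetD
              (if PySem.Chars.startswith seg pvPfx2b then
                PySem.List.pySetD
                  (if PySem.Chars.startswith seg pvPfx2a then
                    PySem.List.pySetD
                      (if PySem.Chars.startswith seg pvPfx1 then PySem.List.pySetD checks 1 true
                       else checks) 2 true
                   else if PySem.Chars.startswith seg pvPfx1 then PySem.List.pySetD checks 1 true
                   else checks) 2 true
               else if PySem.Chars.startswith seg pvPfx2a then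
                 PySem.List.pySetD
                   (if PySem.Chars.startswith seg pvPfx1 then PySem.List.pySetD checks 1 true
                    else checks) 2 true
               else if PySem.Chars.startswith seg pvPfx1 then PySem.List.pySetD checks 1 true
               else checks) 3 true
           else if PySem.Chars.startswith seg pvPfx2b then
             PySem.List.pySetD
               (if PySem.Chars.startswith seg pvPfx2a then
                 PySem.List.pySetD
                   (if PySem.Chars.startswith seg pvPfx1 then PySem.List.pySetD checks 1 true
                    else checks) 2 true
                else if PySem.Chars.startswith seg pvPfx1 then PySem.List.pySetD checks 1 true
                else checks) 2 true
           else if PySem.Chars.startswith seg pvPfx2a then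
             PySem.List.pySetD
               (if PySem.Chars.startswith seg pvPfx1 then PySem.List.pySetD checks 1 true
                else checks) 2 true
           else if PySem.Chars.startswith seg pvPfx1 then PySem.List.pySetD checks 1 true
           else checks)
          (if PySem.Chars.startswith seg pvPfx3 then
            PySem.Set.add
              (if PySem.Chars.startswith seg pvPfx2b then
                PySem.Set.add
                  (if PySem.Chars.startswith seg pvPfx2a then
                    PySem.Set.add
                      (if PySem.Chars.startswith seg pvPfx1 then PySem.Set.add req 1 else req) 2
                   else if PySem.Chars.startswith seg pvPfx1 then PySem.Set.add req 1 else req) 2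
               else if PySem.Chars.startswith seg pvPfx2a then
                 PySem.Set.add
                   (if PySem.Chars.startswith seg pvPfx1 then PySem.Set.add req 1 else req) 2
               else if PySem.Chars.startswith seg pvPfx1 then PySem.Set.add req 1 else req) 3
           else if PySem.Chars.startswith seg pvPfx2b then
             PySem.Set.add
               (if PySem.Chars.startswith seg pvPfx2a then
                 PySem.Set.add
                   (if PySem.Chars.startswith seg pvPfx1 then PySem.Set.add req 1 else req) 2
                else if PySem.Chars.startswith seg pvPfx1 then PySem.Set.add req 1 else req) 2
           else if PySem.Chars.startswith seg pvPfx2a then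
             PySem.Set.add
               (if PySem.Chars.startswith seg pvPfx1 then PySem.Set.add req 1 else req) 2
           else if PySem.Chars.startswith seg pvPfx1 then PySem.Set.add req 1 else req) := by
        apply pvR_ite _ _ _ 3 (by norm_num)
        apply pvR_ite _ _ _ 2 (by norm_num)
        apply pvR_ite _ _ _ 2 (by norm_num)
        apply pvR_ite _ _ _ 1 (by norm_num)
        exact hR
      by_cases hskip : pvSegId seg ≠ prev + 1
      · simp only [if_pos hskip]
        exact rfl
      · simp only [if_neg hskip]
        have h := ih (pvSegId seg) _ _ ids hR'
        rcases hA : pvAPhase1 rest (pvSegId seg) _ with ch | r <;>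
          rcases hB : pvBLoop judgement rest (pvSegId seg) _ ids with p | r' <;>
          rw [hA, hB] at h <;> try exact h.elim
        · obtain ⟨ha, hb, hc⟩ := h
          refine ⟨ha, ?_, ?_⟩
          · rw [hb]; simp only [pvIds]; rw [if_pos h1]
          · intro s hs
            rcases List.mem_cons.1 hs with rfl | hs
            · intro hhdr; rw [h1] at hhdr; cases hhdr
            · exact hc s hs
        · exact h
    · simp only [if_neg h1]
      by_cases h2 : PySem.Chars.strip seg = []
      · simp only [if_pos h2]
        have h := ih prev checks req ids hR
        rcases hA : pvAPhase1 rest prev checks with ch | r <;>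
          rcases hB : pvBLoop judgement rest prev req ids with p | r' <;>
          rw [hA, hB] at h <;> try exact h.elim
        · obtain ⟨ha, hb, hc⟩ := h
          refine ⟨ha, ?_, ?_⟩
          · rw [hb]; simp only [pvIds]; rw [if_neg h1, if_pos h2]
          · intro s hs
            rcases List.mem_cons.1 hs with rfl | hs
            · intro _ hns; exact absurd h2 hns
            · exact hc s hs
        · exact h
      · by_cases h3 : PySem.Chars.startswith seg ['\t'] = true
        · simp only [if_neg h2, if_neg (by simp [h3] : ¬ (!PySem.Chars.startswith seg ['\t']) = true)]
          have h := ih prev checks req (PySem.Set.add ids prev) hR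
          rcases hA : pvAPhase1 rest prev checks with ch | r <;>
            rcases hB : pvBLoop judgement rest prev req (PySem.Set.add ids prev) with p | r' <;>
            rw [hA, hB] at h <;> try exact h.elim
          · obtain ⟨ha, hb, hc⟩ := h
            refine ⟨ha, ?_, ?_⟩
            · rw [hb]; simp only [pvIds]
              rw [if_neg h1, if_neg h2, if_pos h3]
            · intro s hs
              rcases List.mem_cons.1 hs with rfl | hs
              · intro _ _; exact h3
              · exact hc s hs
          · exact h
        · have h3' : (!PySem.Chars.startswith seg ['\t']) = true := by
            simp [eq_false_of_ne_true h3]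
          simp only [if_neg h2, if_pos h3']
          exact rfl

theorem pv_phase2_eq (judgement : String) (segs : List (List Char)) (checks : List Bool)
    (req ids : PySem.Set Int) (htab : pvTabAll segs)
    (hids : ids = pvIds segs 0 PySem.Set.empty) :
    ∀ (L : List Int) (curr : Int),
      (∀ i ∈ L, PySem.List.pyGetD checks i false = PySem.Set.contains req i) →
      (∀ i ∈ L, curr < i ∧ 0 < i) → L.Pairwise (· < ·) →
      pvAPhase2 judgement segs checks L curr = pvBFinal judgement req ids L := by
  intro L
  induction L with
  | nil => intro curr _ _ _; rfl
  | cons i is ihL =>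
    intro curr hRL hlt hpw
    have hci : curr ≠ i := by have := (hlt i List.mem_cons_self).1; omega
    have h0i : (0 : Int) ≠ i := by have := (hlt i List.mem_cons_self).2; omega
    have hscan : (pvAScan segs curr i).1 = PySem.Set.contains ids i := by
      have h := pv_scan_ids i segs curr 0 PySem.Set.empty htab
        (Or.inr ⟨hci, h0i⟩)
      rw [← hids] at h
      have he : PySem.Set.contains PySem.Set.empty i = false := rfl
      rw [he, Bool.false_or] at h
      exact h.symm
    have hpw' := (List.pairwise_cons.1 hpw)
    unfold pvAPhase2 pvBFinal
    rw [hRL i List.mem_cons_self]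
    by_cases hreq : PySem.Set.contains req i = true
    · rw [hreq]
      simp only [if_true]
      by_cases hfound : PySem.Set.contains ids i = true
      · have hs1 : (pvAScan segs curr i).1 = true := hscan.trans hfound
        have hc : (pvAScan segs curr i).2 = i := pv_scan_found_snd i segs curr hs1
        have hsc2 : pvAScan segs curr i = (true, i) := by
          rcases hsc : pvAScan segs curr i with ⟨f, c⟩
          rw [hsc] at hs1 hc
          dsimp at hs1 hc
          rw [hs1, hc]
        rw [hsc2]
        have hB : (true && !PySem.Set.contains ids i) = false := by rw [hfound]; rfl
        rw [hB]
        simp only [Bool.false_eq_true, if_false]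
        exact ihL i (fun j hj => hRL j (List.mem_cons_of_mem _ hj))
          (fun j hj => ⟨hpw'.1 j hj, (hlt j (List.mem_cons_of_mem _ hj)).2⟩) hpw'.2
      · have hf : PySem.Set.contains ids i = false := eq_false_of_ne_true hfound
        have hs1 : (pvAScan segs curr i).1 = false := hscan.trans hf
        have hsc2 : pvAScan segs curr i = (false, (pvAScan segs curr i).2) := by
          rcases hsc : pvAScan segs curr i with ⟨f, c⟩
          rw [hsc] at hs1
          dsimp at hs1
          rw [hs1]
        rw [hsc2]
        have hB : (true && !PySem.Set.contains ids i) = true := by rw [hf]; rfl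
        rw [hB]
        rfl
    · have hf : PySem.Set.contains req i = false := eq_false_of_ne_true hreq
      rw [hf]
      simp only [Bool.false_eq_true, if_false, Bool.false_and]
      exact ihL curr (fun j hj => hRL j (List.mem_cons_of_mem _ hj))
        (fun j hj => hlt j (List.mem_cons_of_mem _ hj)) hpw'.2

-- ===== VERDICT (by name: the statement is the Claim_ definition above) =====
theorem check_judgement_format_spec : Claim_equal_check_judgement_format := by
  intro judgement protocol _
  unfold Spec_check_judgement_format check_judgement_format check_judgement_format_alt
  have hR0 : pvR [false, false, false, false] PySem.Set.empty := ⟨rfl, rfl, rfl, rfl⟩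
  have h := pv_loop_corr judgement (PySem.Chars.splitOn judgement.toList "\n".toList) 0
    [false, false, false, false] PySem.Set.empty PySem.Set.empty hR0
  rcases hA : pvAPhase1 (PySem.Chars.splitOn judgement.toList "\n".toList) 0
      [false, false, false, false] with ch | r <;>
    rcases hB : pvBLoop judgement (PySem.Chars.splitOn judgement.toList "\n".toList) 0
      PySem.Set.empty PySem.Set.empty with p | r' <;>
    rw [hA, hB] at h <;> try exact h.elim
  · obtain ⟨hR, hids, htab⟩ := h
    simp only [hA, hB]
    have hrange : PySem.List.pyRange 1 4 1 = [1, 2, 3] := by decide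
    rw [hrange]
    obtain ⟨hl, h1, h2, h3⟩ := hR
    exact pv_phase2_eq judgement _ ch p.1 p.2 htab hids [1, 2, 3] 0
      (by
        intro i hi
        simp only [List.mem_cons, List.not_mem_nil, or_false] at hi
        rcases hi with rfl | rfl | rfl
        · exact h1
        · exact h2
        · exact h3)
      (by
        intro i hi
        simp only [List.mem_cons, List.not_mem_nil, or_false] at hi
        rcases hi with rfl | rfl | rfl <;> exact ⟨by norm_num, by norm_num⟩)
      (by decide)
  · simp only [hA, hB]; exact h.symm
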